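-- pv_equiv track=rewrite | github.com/tanmayagarwal1/Code | Algorithms/SupplierProfit_pq.py | Supplier
-- ===== SOURCE A (Python) =====
-- import heapq
--
-- def Supplier(arr, k):
-- 	if not arr : raise ValueError
-- 	pq = []
-- 	for num in arr:
-- 		heapq.heappush(pq, -num)
-- 	Profit, count = 0, 0
-- 	while count < k :
-- 		x = heapq.heappop(pq)
-- 		heapq.heappush(pq, x + 1)
-- 		Profit += -(x)
-- 		count += 1
-- 	return Profit
-- ===== SOURCE B (Python) =====
-- def Supplier(arr, k):
--     if not arr:
--         raise ValueError
--     if k <= 0: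
--         return 0
--     # binary search the stopping level t: least t with sum(max(0, a - t)) <= k
--     lo, hi = min(arr) - k, max(arr)
--     while lo < hi:
--         mid = (lo + hi) // 2
--         if sum(a - mid for a in arr if a > mid) <= k:
--             hi = mid
--         else:
--             lo = mid + 1
--     t = lo
--     full = sum(a - t for a in arr if a > t)
--     s = sum((a - t) * (a + t + 1) // 2 for a in arr if a > t)
--     return s + (k - full) * t
-- ===== Notes on version B (the rewrite author's own statement) =====
-- stated objective: alternative
-- what changed: Replaced the k-step heap simulation (pop max, add to profit, push max-1) by a binary search for the stopping level t (the least t with sum(max(0,a-t)) <= k) followed by a closed-form triangular-number sum of all picks above t plus the leftover picks at t.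
import Mathlib
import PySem

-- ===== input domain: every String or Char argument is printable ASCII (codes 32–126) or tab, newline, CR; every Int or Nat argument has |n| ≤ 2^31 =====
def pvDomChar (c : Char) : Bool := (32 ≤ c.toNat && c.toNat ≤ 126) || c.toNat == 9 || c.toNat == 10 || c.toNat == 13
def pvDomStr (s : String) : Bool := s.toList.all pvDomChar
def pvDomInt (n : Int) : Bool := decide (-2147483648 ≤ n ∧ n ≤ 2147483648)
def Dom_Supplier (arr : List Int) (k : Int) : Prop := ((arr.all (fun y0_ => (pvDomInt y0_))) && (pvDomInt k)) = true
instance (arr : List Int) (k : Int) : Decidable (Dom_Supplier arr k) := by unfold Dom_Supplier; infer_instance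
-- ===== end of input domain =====

-- B replaces A's k-step heap simulation by a binary search for the stopping level plus a
-- closed-form triangular-number sum (objective: alternative algorithm, similar measured cost;
-- A's heapq is modelled as a sorted ascending list, exact for the sequence of popped minima
-- and hence for the returned Profit).

-- ===== PORT A =====
-- heapq.heappush: insert into the priority queue (modelled as a sorted ascending list)
def heappush (pq : List Int) (x : Int) : List Int :=
  match pq with
  | [] => [x]
  | y :: ys => if x ≤ y then x :: y :: ys else y :: heappush ys x

-- the 'while count < k' loop; heappop = take the head (the minimum) of the sorted pq
def supLoop (pq : List Int) (profit : Int) (n : Nat) : Int :=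
  match n, pq with
  | 0, _ => profit
  | _ + 1, [] => profit            -- unreachable under Pre_ (pq is never empty)
  | m + 1, x :: rest => supLoop (heappush rest (x + 1)) (profit + (-x)) m

def Supplier (arr : List Int) (k : Int) : Int :=
  let pq := arr.foldl (fun pq num => heappush pq (-num)) []
  supLoop pq 0 k.toNat

-- ===== PORT B =====
-- sum(a - t for a in arr if a > t)
def fsum (arr : List Int) (t : Int) : Int :=
  ((arr.filter (fun a => t < a)).map (fun a => a - t)).sum

-- sum((a - t) * (a + t + 1) // 2 for a in arr if a > t)
def ssum (arr : List Int) (t : Int) : Int :=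
  ((arr.filter (fun a => t < a)).map (fun a => PySem.Int.floordiv ((a - t) * (a + t + 1)) 2)).sum

-- the 'while lo < hi' binary-search loop of Source B
def bsearch (arr : List Int) (k lo hi : Int) : Int :=
  if h : lo < hi then
    let mid := PySem.Int.floordiv (lo + hi) 2
    if fsum arr mid ≤ k then bsearch arr k lo mid else bsearch arr k (mid + 1) hi
  else lo
termination_by (hi - lo).toNat
decreasing_by
  · have hb1 : lo ≤ PySem.Int.floordiv (lo + hi) 2 :=
      (PySem.Int.le_floordiv_iff_mul_le (b := 2) (by omega)).2 (by omega)
    have hb2 : PySem.Int.floordiv (lo + hi) 2 < hi :=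
      (PySem.Int.floordiv_lt_iff_lt_mul (b := 2) (by omega)).2 (by omega)
    omega
  · have hb1 : lo ≤ PySem.Int.floordiv (lo + hi) 2 :=
      (PySem.Int.le_floordiv_iff_mul_le (b := 2) (by omega)).2 (by omega)
    have hb2 : PySem.Int.floordiv (lo + hi) 2 < hi :=
      (PySem.Int.floordiv_lt_iff_lt_mul (b := 2) (by omega)).2 (by omega)
    omega

def Supplier_alt (arr : List Int) (k : Int) : Int :=
  if k ≤ 0 then 0
  else
    let lo := ((PySem.List.min? arr (fun x => x)).getD 0) - k
    let hi := (PySem.List.max? arr (fun x => x)).getD 0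
    let t := bsearch arr k lo hi
    ssum arr t + (k - fsum arr t) * t

-- ===== PRECONDITION & SPEC =====
-- A raises ValueError on the empty list (and so does B); Pre_ excludes exactly that.
def Pre_Supplier (arr : List Int) (k : Int) : Prop := arr ≠ []
instance (arr : List Int) (k : Int) : Decidable (Pre_Supplier arr k) := by
  unfold Pre_Supplier; infer_instance

def pvWitness_Supplier : List Int × Int := ([3, 1, 3], 4)

def Spec_Supplier (arr : List Int) (k : Int) (out : Int) : Prop := out = Supplier_alt arr k
instance (arr : List Int) (k : Int) (out : Int) : Decidable (Spec_Supplier arr k out) := by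
  unfold Spec_Supplier; infer_instance

-- ===== CLAIM (what is proved, stated in full; the proofs are below) =====
def Claim_equal_Supplier : Prop :=
  ∀ (arr : List Int) (k : Int), Dom_Supplier arr k → Pre_Supplier arr k →
    Spec_Supplier arr k (Supplier arr k)

-- ===== LEMMAS AND PROOFS =====

-- per-element quantities: F a t = max(0, a - t); T2 a t = doubled triangular term
def Fel (a t : Int) : Int := if t < a then a - t else 0
def T2el (a t : Int) : Int := if t < a then (a - t) * (a + t + 1) else 0
-- number of elements ≥ t
def cnt (arr : List Int) (t : Int) : Int := (arr.countP (fun a => decide (t ≤ a)) : Int)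
-- doubled ssum
def SS2 (arr : List Int) (t : Int) : Int := (arr.map (fun a => T2el a t)).sum
-- the closed-form expression at level t
def Eform (arr : List Int) (k t : Int) : Int := ssum arr t + (k - fsum arr t) * t

-- per-element halved triangular term (as computed by B)
def Tel (a t : Int) : Int := if t < a then PySem.Int.floordiv ((a - t) * (a + t + 1)) 2 else 0

theorem Fel_nonneg (a t : Int) : 0 ≤ Fel a t := by unfold Fel; split_ifs <;> omega

theorem fsum_cons (a : Int) (l : List Int) (t : Int) :
    fsum (a :: l) t = Fel a t + fsum l t := by
  simp only [fsum, Fel, List.filter_cons]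
  split_ifs with h h' <;> simp_all

theorem ssum_cons (a : Int) (l : List Int) (t : Int) :
    ssum (a :: l) t = Tel a t + ssum l t := by
  simp only [ssum, Tel, List.filter_cons]
  split_ifs with h h' <;> simp_all

theorem fsum_nonneg (arr : List Int) (t : Int) : 0 ≤ fsum arr t := by
  induction arr with
  | nil => simp [fsum]
  | cons a l ih => have := Fel_nonneg a t; rw [fsum_cons]; omega

theorem fsum_antitone (arr : List Int) {t t' : Int} (h : t ≤ t') :
    fsum arr t' ≤ fsum arr t := by
  induction arr with
  | nil => simp [fsum]
  | cons a l ih =>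
    have hf : Fel a t' ≤ Fel a t := by unfold Fel; split_ifs <;> omega
    rw [fsum_cons, fsum_cons]; omega

theorem cnt_cons (a : Int) (l : List Int) (t : Int) :
    cnt (a :: l) t = (if t ≤ a then 1 else 0) + cnt l t := by
  unfold cnt; rw [List.countP_cons]
  by_cases h : t ≤ a <;> simp [h] <;> push_cast <;> ring

theorem fsum_step (arr : List Int) (t : Int) :
    fsum arr (t - 1) = fsum arr t + cnt arr t := by
  induction arr with
  | nil => simp [fsum, cnt]
  | cons a l ih =>
    rw [fsum_cons, fsum_cons, cnt_cons]
    have hf : Fel a (t - 1) = Fel a t + (if t ≤ a then 1 else 0) := by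
      unfold Fel; split_ifs <;> omega
    omega

theorem fsum_eq_zero (arr : List Int) (t : Int) (h : ∀ a ∈ arr, a ≤ t) :
    fsum arr t = 0 := by
  induction arr with
  | nil => simp [fsum]
  | cons a l ih =>
    have h1 : Fel a t = 0 := by unfold Fel; have := h a (by simp); split_ifs <;> omega
    rw [fsum_cons, h1, ih (fun x hx => h x (by simp [hx]))]; ring

theorem ssum_eq_zero (arr : List Int) (t : Int) (h : ∀ a ∈ arr, a ≤ t) :
    ssum arr t = 0 := by
  induction arr with
  | nil => simp [ssum]
  | cons a l ih =>
    have h1 : Tel a t = 0 := by unfold Tel; have := h a (by simp); split_ifs <;> omega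
    rw [ssum_cons, h1, ih (fun x hx => h x (by simp [hx]))]; ring

theorem le_fsum (arr : List Int) (t a : Int) (ha : a ∈ arr) (h : t < a) :
    a - t ≤ fsum arr t := by
  induction arr with
  | nil => simp at ha
  | cons b l ih =>
    rw [fsum_cons]
    rcases List.mem_cons.1 ha with rfl | hmem
    · have := fsum_nonneg l t
      have hb : Fel a t = a - t := by unfold Fel; split_ifs <;> omega
      omega
    · have := Fel_nonneg b t
      have := ih hmem
      omega

theorem two_Tel (a t : Int) : 2 * Tel a t = T2el a t := by
  unfold Tel T2el
  split_ifs with h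
  · rw [PySem.Int.floordiv_eq_ediv_of_pos (by norm_num)]
    have key : ∃ w : Int, (a - t) * (a + t + 1) = w + w := by
      rcases Int.even_or_odd (a - t) with ⟨r, hr⟩ | ⟨r, hr⟩
      · have ha : a = r + r + t := by omega
        exact ⟨r * (a + t + 1), by rw [ha]; ring⟩
      · have ha : a = 2 * r + 1 + t := by omega
        exact ⟨(a - t) * (r + t + 1), by rw [ha]; ring⟩
    obtain ⟨w, hw⟩ := key
    rw [hw]; omega
  · rfl

theorem two_ssum (arr : List Int) (t : Int) : 2 * ssum arr t = SS2 arr t := by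
  induction arr with
  | nil => simp [ssum, SS2]
  | cons a l ih =>
    have := two_Tel a t
    rw [ssum_cons]; simp only [SS2, List.map_cons, List.sum_cons]
    have ihs : (l.map (fun a => T2el a t)).sum = 2 * ssum l t := (ih).symm
    rw [ihs]; omega

theorem SS2_cons (a : Int) (l : List Int) (t : Int) :
    SS2 (a :: l) t = T2el a t + SS2 l t := by simp [SS2]

theorem SS2_step (arr : List Int) (t : Int) :
    SS2 arr (t - 1) = SS2 arr t + 2 * t * cnt arr t := by
  induction arr with
  | nil => simp [SS2, cnt]
  | cons a l ih =>
    rw [SS2_cons, SS2_cons, cnt_cons, ih]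
    have hx : T2el a (t - 1) = T2el a t + 2 * t * (if t ≤ a then 1 else 0) := by
      unfold T2el
      by_cases h1 : t < a
      · rw [if_pos (by omega), if_pos h1, if_pos (by omega)]; ring
      · by_cases h2 : t = a
        · subst h2; rw [if_pos (by omega), if_neg (by omega), if_pos (by omega)]; ring
        · rw [if_neg (by omega), if_neg h1, if_neg (by omega)]; ring
    rw [hx]; ring

theorem Eform_step (arr : List Int) (k t : Int) (h : fsum arr (t - 1) = k) :
    Eform arr k (t - 1) = Eform arr k t := by
  have e1 : 2 * Eform arr k (t - 1) = SS2 arr (t - 1) + 2 * (k - fsum arr (t - 1)) * (t - 1) := by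
    unfold Eform; rw [← two_ssum]; ring
  have e2 : 2 * Eform arr k t = SS2 arr t + 2 * (k - fsum arr t) * t := by
    unfold Eform; rw [← two_ssum]; ring
  rw [SS2_step, fsum_step] at e1
  have hc : cnt arr t = k - fsum arr t := by
    have := fsum_step arr t; omega
  have key : 2 * Eform arr k (t - 1) = 2 * Eform arr k t := by
    rw [e1, e2, hc]; ring
  omega

theorem Eform_eq_down (arr : List Int) (k : Int) :
    ∀ n : Nat, ∀ t t' : Int, t' = t + n → fsum arr t ≤ k → k ≤ fsum arr (t' - 1) →
      Eform arr k t = Eform arr k t' := by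
  intro n
  induction n with
  | zero => intro t t' h _ _; simp at h; rw [h]
  | succ n ih =>
    intro t t' h h1 h2
    have ht : t ≤ t' - 1 := by omega
    have hf : fsum arr (t' - 1) = k :=
      le_antisymm (le_trans (fsum_antitone arr ht) h1) h2
    have e := Eform_step arr k t' hf
    have h2' : k ≤ fsum arr (t' - 1 - 1) := by
      calc k = fsum arr (t' - 1) := hf.symm
        _ ≤ fsum arr (t' - 1 - 1) := fsum_antitone arr (by omega)
    rw [← e]
    exact ih t (t' - 1) (by omega) h1 h2'

theorem Eform_unique (arr : List Int) (k : Int) {t t' : Int}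
    (h1 : fsum arr t ≤ k) (h2 : k ≤ fsum arr (t - 1))
    (h1' : fsum arr t' ≤ k) (h2' : k ≤ fsum arr (t' - 1)) :
    Eform arr k t = Eform arr k t' := by
  rcases le_total t t' with h | h
  · exact Eform_eq_down arr k (t' - t).toNat t t' (by omega) h1 h2'
  · exact (Eform_eq_down arr k (t - t').toNat t' t (by omega) h1' h2).symm

theorem bsearch_spec (arr : List Int) (k : Int) :
    ∀ lo hi : Int, lo ≤ hi → fsum arr hi ≤ k →
      lo ≤ bsearch arr k lo hi ∧ bsearch arr k lo hi ≤ hi ∧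
      fsum arr (bsearch arr k lo hi) ≤ k ∧
      (bsearch arr k lo hi = lo ∨ k < fsum arr (bsearch arr k lo hi - 1)) := by
  intro lo hi
  induction lo, hi using bsearch.induct (arr := arr) (k := k) with
  | case1 lo hi hlt mid hmid ih =>
    intro _ hhi
    have hmdef : mid = PySem.Int.floordiv (lo + hi) 2 := rfl
    rw [bsearch]
    simp only [dif_pos hlt]
    rw [← hmdef, if_pos hmid]
    have hb1 : lo ≤ mid := by
      rw [hmdef]; exact (PySem.Int.le_floordiv_iff_mul_le (b := 2) (by omega)).2 (by omega)
    have hb2 : mid < hi := by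
      rw [hmdef]; exact (PySem.Int.floordiv_lt_iff_lt_mul (b := 2) (by omega)).2 (by omega)
    obtain ⟨i1, i2, i3, i4⟩ := ih hb1 hmid
    exact ⟨i1, by omega, i3, i4⟩
  | case2 lo hi hlt mid hmid ih =>
    intro _ hhi
    have hmdef : mid = PySem.Int.floordiv (lo + hi) 2 := rfl
    rw [bsearch]
    simp only [dif_pos hlt]
    rw [← hmdef, if_neg hmid]
    have hb1 : lo ≤ mid := by
      rw [hmdef]; exact (PySem.Int.le_floordiv_iff_mul_le (b := 2) (by omega)).2 (by omega)
    have hb2 : mid < hi := by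
      rw [hmdef]; exact (PySem.Int.floordiv_lt_iff_lt_mul (b := 2) (by omega)).2 (by omega)
    obtain ⟨i1, i2, i3, i4⟩ := ih (by omega) hhi
    refine ⟨by omega, i2, i3, Or.inr ?_⟩
    rcases i4 with h | h
    · rw [h]; simpa using hmid
    · exact h
  | case3 lo hi hlt =>
    intro hle hhi
    rw [bsearch]
    simp only [dif_neg hlt]
    have heq : lo = hi := by omega
    subst heq
    exact ⟨le_refl lo, le_refl lo, hhi, Or.inl (by trivial)⟩

theorem alt_char (arr : List Int) (k : Int) (hne : arr ≠ []) (hk : 0 ≤ k) :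
    ∃ t : Int, fsum arr t ≤ k ∧ k ≤ fsum arr (t - 1) ∧
      t ≤ (PySem.List.max? arr (fun x => x)).getD 0 ∧
      Supplier_alt arr k = Eform arr k t := by
  obtain ⟨M, hM⟩ : ∃ M, PySem.List.max? arr (fun x => x) = some M := by
    cases h : PySem.List.max? arr (fun x => x) with
    | none => exact absurd ((PySem.List.max?_eq_none_iff _ _).1 h) hne
    | some M => exact ⟨M, rfl⟩
  obtain ⟨m, hm⟩ : ∃ m, PySem.List.min? arr (fun x => x) = some m := by
    cases h : PySem.List.min? arr (fun x => x) with
    | none => exact absurd ((PySem.List.min?_eq_none_iff _ _).1 h) hne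
    | some m => exact ⟨m, rfl⟩
  have hMmax : ∀ y ∈ arr, y ≤ M := PySem.List.max?_isMax hM
  have hmmin : ∀ y ∈ arr, m ≤ y := PySem.List.min?_isMin hm
  have hmmem : m ∈ arr := PySem.List.min?_mem hm
  have hMmem : M ∈ arr := PySem.List.max?_mem hM
  have hfM : fsum arr M = 0 := fsum_eq_zero arr M hMmax
  rcases eq_or_lt_of_le hk with hk0 | hk1
  · -- k = 0: the level M itself is bracketed and the value is 0
    refine ⟨M, by omega, by have := fsum_nonneg arr (M - 1); omega, by rw [hM]; exact le_refl M, ?_⟩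
    have hsz : ssum arr M = 0 := ssum_eq_zero arr M hMmax
    rw [← hk0]
    simp only [Supplier_alt, if_pos (le_refl (0 : Int))]
    unfold Eform
    rw [hfM, hsz]; ring
  · -- k ≥ 1: the binary search produces a bracketed level
    have hk1' : 1 ≤ k := hk1
    have hmM : m ≤ M := hmmin M hMmem
    have hle : m - k ≤ M := by omega
    obtain ⟨b1, b2, b3, b4⟩ := bsearch_spec arr k (m - k) M hle (by omega)
    set t := bsearch arr k (m - k) M with ht
    have hbr : k ≤ fsum arr (t - 1) := by
      rcases b4 with h | h
      · -- t = lo0 = m - k : fsum there is already ≥ k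
        have h1 : k ≤ fsum arr (m - k) := by
          have := le_fsum arr (m - k) m hmmem (by omega)
          omega
        have h2 : fsum arr (m - k) ≤ fsum arr (m - k - 1) := fsum_antitone arr (by omega)
        rw [h]; omega
      · omega
    refine ⟨t, b3, hbr, by rw [hM]; exact b2, ?_⟩
    simp only [Supplier_alt, if_neg (by omega : ¬ k ≤ 0), hM, hm, Option.getD_some]
    rfl

theorem alt_of_bracket (arr : List Int) (k : Int) (hne : arr ≠ []) (hk : 0 ≤ k)
    {t : Int} (h1 : fsum arr t ≤ k) (h2 : k ≤ fsum arr (t - 1)) :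
    Supplier_alt arr k = Eform arr k t := by
  obtain ⟨t', c1, c2, _, c4⟩ := alt_char arr k hne hk
  rw [c4]
  exact Eform_unique arr k c1 c2 h1 h2

theorem fsum_perm {arr arr' : List Int} (h : arr.Perm arr') (t : Int) :
    fsum arr t = fsum arr' t := by
  exact ((h.filter _).map _).sum_eq

theorem ssum_perm {arr arr' : List Int} (h : arr.Perm arr') (t : Int) :
    ssum arr t = ssum arr' t := by
  exact ((h.filter _).map _).sum_eq

theorem Eform_perm {arr arr' : List Int} (h : arr.Perm arr') (k t : Int) :
    Eform arr k t = Eform arr' k t := by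
  unfold Eform; rw [fsum_perm h, ssum_perm h]

theorem alt_perm {arr arr' : List Int} (h : arr.Perm arr') (k : Int) :
    Supplier_alt arr k = Supplier_alt arr' k := by
  rcases eq_or_ne arr ([] : List Int) with rfl | hne
  · rw [h.nil_eq]
  · have hne' : arr' ≠ [] := by
      intro hh; subst hh; rw [List.perm_nil] at h; exact hne h
    by_cases hk : k ≤ 0
    · simp [Supplier_alt, if_pos hk]
    · obtain ⟨t, c1, c2, _, c4⟩ := alt_char arr k hne (by omega)
      rw [c4, Eform_perm h]
      exact (alt_of_bracket arr' k hne' (by omega) (by rw [← fsum_perm h]; exact c1)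
        (by rw [← fsum_perm h]; exact c2)).symm

theorem fsum_rel (m : Int) (vs : List Int) (t : Int) :
    fsum (m :: vs) t = fsum ((m - 1) :: vs) t + (if t ≤ m - 1 then 1 else 0) := by
  rw [fsum_cons, fsum_cons]
  have h : Fel m t = Fel (m - 1) t + (if t ≤ m - 1 then 1 else 0) := by
    unfold Fel; split_ifs <;> omega
  rw [h]; ring

theorem Eform_rel (m : Int) (vs : List Int) (k t : Int) (ht : t ≤ m) :
    Eform (m :: vs) (k + 1) t = Eform ((m - 1) :: vs) k t + m := by
  have h1 := two_ssum (m :: vs) t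
  rw [SS2_cons] at h1
  have h2 := two_ssum ((m - 1) :: vs) t
  rw [SS2_cons] at h2
  have e1 : 2 * Eform (m :: vs) (k + 1) t
      = (T2el m t + SS2 vs t) + 2 * (k + 1 - (Fel m t + fsum vs t)) * t := by
    unfold Eform; rw [fsum_cons]; linear_combination h1
  have e2 : 2 * Eform ((m - 1) :: vs) k t
      = (T2el (m - 1) t + SS2 vs t) + 2 * (k - (Fel (m - 1) t + fsum vs t)) * t := by
    unfold Eform; rw [fsum_cons]; linear_combination h2
  have key : (T2el m t + SS2 vs t) + 2 * (k + 1 - (Fel m t + fsum vs t)) * t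
      = ((T2el (m - 1) t + SS2 vs t) + 2 * (k - (Fel (m - 1) t + fsum vs t)) * t) + 2 * m := by
    unfold T2el Fel
    split_ifs with p1 p2
    · ring
    · have hte : t = m - 1 := by omega
      subst hte; ring
    · exfalso; omega
    · have hte : t = m := by omega
      subst hte; ring
  omega

-- the greedy recurrence of the closed form: one pick of the maximum m
theorem crux (m : Int) (vs : List Int) (hvs : ∀ v ∈ vs, v ≤ m) (k : Int) (hk : 0 ≤ k) :
    Supplier_alt (m :: vs) (k + 1) = Supplier_alt ((m - 1) :: vs) k + m := by
  have hne' : ((m - 1) :: vs) ≠ [] := by simp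
  obtain ⟨t, c1, c2, c3, c4⟩ := alt_char ((m - 1) :: vs) k hne' hk
  obtain ⟨Mx, hMx⟩ : ∃ M, PySem.List.max? ((m - 1) :: vs) (fun x => x) = some M := by
    cases h : PySem.List.max? ((m - 1) :: vs) (fun x => x) with
    | none => exact absurd ((PySem.List.max?_eq_none_iff _ _).1 h) hne'
    | some M => exact ⟨M, rfl⟩
  have hMxle : Mx ≤ m := by
    have hmem := PySem.List.max?_mem hMx
    rcases List.mem_cons.1 hmem with h | h
    · omega
    · exact hvs _ h
  have htm : t ≤ m := by rw [hMx] at c3; simp at c3; omega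
  have hb1 : fsum (m :: vs) t ≤ k + 1 := by
    rw [fsum_rel]; split_ifs <;> omega
  have hb2 : k + 1 ≤ fsum (m :: vs) (t - 1) := by
    rw [fsum_rel, if_pos (by omega : t - 1 ≤ m - 1)]; omega
  rw [alt_of_bracket (m :: vs) (k + 1) (by simp) (by omega) hb1 hb2,
    Eform_rel m vs k t htm, ← c4]

theorem heappush_perm (l : List Int) (x : Int) : (heappush l x).Perm (x :: l) := by
  induction l with
  | nil => simp [heappush]
  | cons y ys ih =>
    rw [heappush]
    split_ifs with h
    · exact List.Perm.refl _
    · exact (ih.cons y).trans (List.Perm.swap x y ys)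

theorem mem_heappush {l : List Int} {x z : Int} (h : z ∈ heappush l x) : z = x ∨ z ∈ l := by
  have := (heappush_perm l x).mem_iff.1 h
  simpa using this

theorem heappush_sorted {l : List Int} (h : l.Pairwise (· ≤ ·)) (x : Int) :
    (heappush l x).Pairwise (· ≤ ·) := by
  induction l with
  | nil => simp [heappush]
  | cons y ys ih =>
    rw [List.pairwise_cons] at h
    obtain ⟨hy, hys⟩ := h
    rw [heappush]
    split_ifs with hxy
    · refine List.pairwise_cons.2 ⟨?_, List.pairwise_cons.2 ⟨hy, hys⟩⟩
      intro z hz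
      rcases List.mem_cons.1 hz with rfl | hz
      · exact hxy
      · exact le_trans hxy (hy z hz)
    · refine List.pairwise_cons.2 ⟨?_, ih hys⟩
      intro z hz
      rcases mem_heappush hz with rfl | hz
      · omega
      · exact hy z hz

theorem supLoop_eq (n : Nat) : ∀ (pq : List Int) (p : Int), pq ≠ [] →
    pq.Pairwise (· ≤ ·) →
    supLoop pq p n = p + Supplier_alt (pq.map (fun v => -v)) (n : Int) := by
  induction n with
  | zero =>
    intro pq p _ _
    simp [supLoop, Supplier_alt]
  | succ n ih =>
    intro pq p hne hsort
    cases pq with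
    | nil => exact absurd rfl hne
    | cons x rest =>
      simp only [supLoop]
      have hpc := List.pairwise_cons.1 hsort
      have hs' : (heappush rest (x + 1)).Pairwise (· ≤ ·) :=
        heappush_sorted hpc.2 (x + 1)
      have hne' : heappush rest (x + 1) ≠ [] := by
        intro hh
        have hlen := (heappush_perm rest (x + 1)).length_eq
        rw [hh] at hlen; simp at hlen
      rw [ih _ _ hne' hs']
      have hperm : ((heappush rest (x + 1)).map (fun v => -v)).Perm
          ((-(x + 1)) :: rest.map (fun v => -v)) := by
        simpa using (heappush_perm rest (x + 1)).map (fun v => -v)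
      rw [alt_perm hperm]
      have hvs : ∀ v ∈ rest.map (fun v => -v), v ≤ -x := by
        intro v hv
        obtain ⟨r, hr, rfl⟩ := List.mem_map.1 hv
        have := hpc.1 r hr; omega
      have hcrux := crux (-x) (rest.map (fun v => -v)) hvs (n : Int) (Int.natCast_nonneg n)
      have hx : (-(x + 1) : Int) = -x - 1 := by ring
      have hcast : ((n + 1 : Nat) : Int) = (n : Int) + 1 := by push_cast; ring
      rw [List.map_cons, hcast, hx]
      omega

theorem foldl_heappush_perm (arr : List Int) :
    ∀ acc : List Int,
      (arr.foldl (fun pq num => heappush pq (-num)) acc).Perm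
        (acc ++ arr.map (fun v => -v)) := by
  induction arr with
  | nil => intro acc; simp
  | cons a l ih =>
    intro acc
    simp only [List.foldl_cons, List.map_cons]
    refine (ih (heappush acc (-a))).trans ?_
    refine ((heappush_perm acc (-a)).append_right _).trans ?_
    exact List.perm_middle.symm

theorem foldl_heappush_sorted (arr : List Int) :
    ∀ acc : List Int, acc.Pairwise (· ≤ ·) →
      (arr.foldl (fun pq num => heappush pq (-num)) acc).Pairwise (· ≤ ·) := by
  induction arr with
  | nil => intro acc h; simpa using h
  | cons a l ih =>
    intro acc h
    simp only [List.foldl_cons]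
    exact ih _ (heappush_sorted h (-a))

-- ===== VERDICT (by name: the statement is the Claim_ definition above) =====
theorem Supplier_spec : Claim_equal_Supplier := by
  intro arr k _ hpre
  unfold Spec_Supplier
  unfold Pre_Supplier at hpre
  show Supplier arr k = Supplier_alt arr k
  unfold Supplier
  have hperm : (arr.foldl (fun pq num => heappush pq (-num)) []).Perm
      (arr.map (fun v => -v)) := by
    simpa using foldl_heappush_perm arr []
  have hsort : (arr.foldl (fun pq num => heappush pq (-num)) []).Pairwise (· ≤ ·) :=
    foldl_heappush_sorted arr [] List.Pairwise.nil
  have hne : arr.foldl (fun pq num => heappush pq (-num)) [] ≠ [] := by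
    intro hh
    have hlen := hperm.length_eq
    rw [hh] at hlen
    simp at hlen
    exact hpre (List.eq_nil_of_length_eq_zero hlen.symm)
  rw [supLoop_eq k.toNat _ 0 hne hsort]
  have hmap : ((arr.foldl (fun pq num => heappush pq (-num)) []).map (fun v => -v)).Perm arr := by
    have h2 := hperm.map (fun v => -v)
    simpa [List.map_map, Function.comp] using h2
  rw [alt_perm hmap]
  by_cases hk : k ≤ 0
  · have h0 : k.toNat = 0 := Int.toNat_of_nonpos hk
    rw [h0]
    simp [Supplier_alt, hk]
  · rw [Int.toNat_of_nonneg (by omega)]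
    rw [zero_add]
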